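-- pv_equiv track=rewrite | github.com/avi-natan/JJ | simulator.py | stuck
-- ===== SOURCE A (Python) =====
-- def stuck(ptrs_curr, ptrs_prev, plans):
--     if ptrs_curr != ptrs_prev:
--         return False
--     else:
--         for a in range(len(plans)):
--             if ptrs_curr[a] < len(plans[a]) - 1:
--                 wanted_position = [plans[a][ptrs_curr[a]+1][0], plans[a][ptrs_curr[a]+1][1]]
--                 for p in range(len(plans)):
--                     if p != a and plans[p][-1] == wanted_position and ptrs_curr[p] == len(plans[p])-1:
--                         return True
--         return False
-- ===== SOURCE B (Python) =====
-- def stuck(ptrs_curr, ptrs_prev, plans):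
--     if ptrs_curr != ptrs_prev:
--         return False
--     finished = {tuple(plans[p][-1])
--                 for p in range(len(plans))
--                 if ptrs_curr[p] == len(plans[p]) - 1}
--     wanted = {tuple(plans[a][ptrs_curr[a] + 1][0:2])
--               for a in range(len(plans))
--               if ptrs_curr[a] < len(plans[a]) - 1}
--     return bool(wanted & finished)
-- ===== Notes on version B (the rewrite author's own statement) =====
-- stated objective: simpler
-- what changed: Replaces A's nested quadratic agent-vs-agent scan with two independent linear passes that build a set of wanted next positions and a set of finished agents' last positions, returning whether the sets intersect (the p!=a test disappears: a blocked agent is never finished).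
-- outside the precondition, e.g. on stuck([5], [5], [[[0, 0]]]): A returns False, B returns False; on stuck([-2], [-2], [[[0, 0], [1, 1], [2, 2]]]): A returns False, B returns False; on stuck([0], [0], [[[1]]]): A returns False, B returns False
import Mathlib
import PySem

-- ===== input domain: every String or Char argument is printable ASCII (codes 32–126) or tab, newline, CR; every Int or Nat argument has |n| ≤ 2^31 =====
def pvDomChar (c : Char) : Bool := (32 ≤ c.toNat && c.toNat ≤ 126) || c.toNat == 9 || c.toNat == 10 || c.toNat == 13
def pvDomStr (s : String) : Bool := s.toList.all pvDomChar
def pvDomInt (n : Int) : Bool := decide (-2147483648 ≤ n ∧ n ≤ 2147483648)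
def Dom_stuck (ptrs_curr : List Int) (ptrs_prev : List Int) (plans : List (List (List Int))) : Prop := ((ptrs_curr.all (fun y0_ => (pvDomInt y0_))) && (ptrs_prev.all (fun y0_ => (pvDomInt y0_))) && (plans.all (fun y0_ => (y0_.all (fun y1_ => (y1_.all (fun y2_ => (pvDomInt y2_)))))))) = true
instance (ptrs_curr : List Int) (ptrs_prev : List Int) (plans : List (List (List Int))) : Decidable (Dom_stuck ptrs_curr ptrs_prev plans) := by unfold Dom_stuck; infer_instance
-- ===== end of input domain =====

-- B replaces A's nested agent-vs-agent scan by two independent passes building a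
-- 'wanted next positions' set and a 'finished agents' last positions' set and
-- intersecting them (simpler, linear structure); return values only, no mutation.

-- ===== PORT A =====
def stuck (ptrs_curr : List Int) (ptrs_prev : List Int) (plans : List (List (List Int))) : Bool :=
  if ptrs_curr ≠ ptrs_prev then false
  else
    (List.range plans.length).any (fun a =>
      let pa := plans.getD a []
      let ca := (PySem.List.pyGet? ptrs_curr (a : Int)).getD 0
      if ca < (pa.length : Int) - 1 then
        let nxt := (PySem.List.pyGet? pa (ca + 1)).getD []
        let wanted_position := [(PySem.List.pyGet? nxt 0).getD 0, (PySem.List.pyGet? nxt 1).getD 0]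
        (List.range plans.length).any (fun p =>
          let pp := plans.getD p []
          decide (p ≠ a) &&
          ((PySem.List.pyGet? pp (-1)).getD [] == wanted_position) &&
          ((PySem.List.pyGet? ptrs_curr (p : Int)).getD 0 == (pp.length : Int) - 1))
      else false)

-- ===== PORT B =====
def stuck_alt (ptrs_curr : List Int) (ptrs_prev : List Int) (plans : List (List (List Int))) : Bool :=
  if ptrs_curr ≠ ptrs_prev then false
  else
    -- variable-length Python int tuples are modelled as List Int
    let finished : PySem.Set (List Int) := PySem.Set.ofList
      (((List.range plans.length).filter (fun (p : Nat) =>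
          (PySem.List.pyGet? ptrs_curr ((p : Int))).getD 0 == ((plans.getD p []).length : Int) - 1)).map
        (fun p => (PySem.List.pyGet? (plans.getD p []) (-1)).getD []))
    let wanted : PySem.Set (List Int) := PySem.Set.ofList
      (((List.range plans.length).filter (fun (a : Nat) =>
          (PySem.List.pyGet? ptrs_curr ((a : Int))).getD 0 < ((plans.getD a []).length : Int) - 1)).map
        (fun a => PySem.List.slice
          ((PySem.List.pyGet? (plans.getD a []) ((PySem.List.pyGet? ptrs_curr ((a : Int))).getD 0 + 1)).getD [])
          (some 0) (some 2)))
    !(PySem.Set.inter wanted finished).isEmpty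

-- ===== PRECONDITION & SPEC =====
-- Pre_ restricts the equal-pointer case (the only case where A indexes anything) to
-- well-formed simulator states: one in-range pointer per plan and 2-coordinate (or longer)
-- positions; it excludes inputs where A raises (missing pointer, pointer+1 too negative,
-- next position shorter than 2) and, with them, out-of-range or negative pointers and
-- short never-accessed positions on which A merely skips (see cites).
def Pre_stuck (ptrs_curr : List Int) (ptrs_prev : List Int) (plans : List (List (List Int))) : Prop :=
  ptrs_curr = ptrs_prev →
    (plans.length ≤ ptrs_curr.length ∧
     (∀ a < plans.length, 0 ≤ ptrs_curr.getD a 0 ∧ ptrs_curr.getD a 0 < ((plans.getD a []).length : Int)) ∧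
     (∀ plan ∈ plans, ∀ pos ∈ plan, 2 ≤ pos.length))
instance (ptrs_curr : List Int) (ptrs_prev : List Int) (plans : List (List (List Int))) : Decidable (Pre_stuck ptrs_curr ptrs_prev plans) := by unfold Pre_stuck; infer_instance

def pvWitness_stuck : List Int × List Int × List (List (List Int)) :=
  ([0, 1], [0, 1], [[[0, 0], [1, 1]], [[2, 2], [1, 1]]])

def Spec_stuck (ptrs_curr : List Int) (ptrs_prev : List Int) (plans : List (List (List Int))) (out : Bool) : Prop := out = stuck_alt ptrs_curr ptrs_prev plans
instance (ptrs_curr : List Int) (ptrs_prev : List Int) (plans : List (List (List Int))) (out : Bool) : Decidable (Spec_stuck ptrs_curr ptrs_prev plans out) := by unfold Spec_stuck; infer_instance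

-- ===== CLAIM (what is proved, stated in full; the proofs are below) =====
def Claim_equal_stuck : Prop := ∀ (ptrs_curr : List Int) (ptrs_prev : List Int) (plans : List (List (List Int))), Dom_stuck ptrs_curr ptrs_prev plans → Pre_stuck ptrs_curr ptrs_prev plans → Spec_stuck ptrs_curr ptrs_prev plans (stuck ptrs_curr ptrs_prev plans)

-- ===== LEMMAS AND PROOFS =====

-- the next position a moving agent wants: A's [x0, x1] literal equals B's [0:2] slice
theorem want_slice_eq (pc : List Int) (plans : List (List (List Int))) (a : Nat)
    (ha : a < plans.length)
    (h0 : 0 ≤ (PySem.List.pyGet? pc (a : Int)).getD 0)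
    (hpos : ∀ plan ∈ plans, ∀ pos ∈ plan, 2 ≤ pos.length)
    (hmov : (PySem.List.pyGet? pc (a : Int)).getD 0 < ((plans.getD a []).length : Int) - 1) :
    PySem.List.slice
        ((PySem.List.pyGet? (plans.getD a []) ((PySem.List.pyGet? pc (a : Int)).getD 0 + 1)).getD [])
        (some 0) (some 2)
      = [(PySem.List.pyGet? ((PySem.List.pyGet? (plans.getD a []) ((PySem.List.pyGet? pc (a : Int)).getD 0 + 1)).getD []) 0).getD 0,
         (PySem.List.pyGet? ((PySem.List.pyGet? (plans.getD a []) ((PySem.List.pyGet? pc (a : Int)).getD 0 + 1)).getD []) 1).getD 0] := by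
  set pa := plans.getD a [] with hpa
  set i := (PySem.List.pyGet? pc (a : Int)).getD 0 with hi
  have hsome : PySem.List.pyGet? pa (i + 1) = some (pa[(i+1).toNat]'(by omega)) :=
    PySem.List.pyGet?_eq_some_getElem pa (by omega) (by omega)
  have hmem : pa[(i+1).toNat]'(by omega) ∈ pa := PySem.List.mem_of_pyGet?_eq_some pa hsome
  have hpam : pa ∈ plans := by
    rw [hpa, List.getD_eq_getElem plans [] ha]; exact List.getElem_mem ha
  have hlen2 : 2 ≤ (pa[(i+1).toNat]'(by omega)).length := hpos pa hpam _ hmem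
  rw [hsome]
  obtain ⟨v0, v1, rest, hv⟩ : ∃ v0 v1 rest, pa[(i+1).toNat]'(by omega) = v0 :: v1 :: rest := by
    rcases hne : pa[(i+1).toNat]'(by omega) with _ | ⟨v0, _ | ⟨v1, rest⟩⟩
    · rw [hne] at hlen2; simp at hlen2
    · rw [hne] at hlen2; simp at hlen2
    · exact ⟨_, _, _, rfl⟩
  rw [hv]
  have hnn : ∀ n : Nat, (0:Int) ≤ (n:Int) + 1 := by intro n; positivity
  simp [PySem.List.slice_to, PySem.List.pyGet?, PySem.List.pyIdx?, hnn]

theorem stuck_main (ptrs_curr : List Int) (plans : List (List (List Int)))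
    (_hlen : plans.length ≤ ptrs_curr.length)
    (hptr : ∀ a < plans.length, 0 ≤ ptrs_curr.getD a 0 ∧ ptrs_curr.getD a 0 < ((plans.getD a []).length : Int))
    (hpos : ∀ plan ∈ plans, ∀ pos ∈ plan, 2 ≤ pos.length) :
    stuck ptrs_curr ptrs_curr plans = stuck_alt ptrs_curr ptrs_curr plans := by
  have hget : ∀ a : Nat, (PySem.List.pyGet? ptrs_curr (a : Int)).getD 0 = ptrs_curr.getD a 0 := by
    intro a; simp [PySem.List.pyGet?_natCast, List.getD_eq_getElem?_getD]
  rw [Bool.eq_iff_iff]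
  unfold stuck stuck_alt
  simp only [if_neg (show ¬(ptrs_curr ≠ ptrs_curr) from fun h => h rfl)]
  simp only [List.any_eq_true, List.mem_range, Bool.not_eq_true', List.isEmpty_eq_false_iff_exists_mem,
    PySem.Set.mem_inter, PySem.Set.mem_ofList, List.mem_map, List.mem_filter, List.mem_range,
    decide_eq_true_eq, beq_iff_eq]
  constructor
  · rintro ⟨a, ha, hA⟩
    by_cases hm : (PySem.List.pyGet? ptrs_curr (a : Int)).getD 0 < ((plans.getD a []).length : Int) - 1
    · rw [if_pos hm] at hA
      simp only [List.any_eq_true, List.mem_range, Bool.and_eq_true, decide_eq_true_eq, beq_iff_eq] at hA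
      obtain ⟨p, hp, ⟨⟨hpa, hlast⟩, hfin⟩⟩ := hA
      have h0a : 0 ≤ (PySem.List.pyGet? ptrs_curr (a : Int)).getD 0 := by
        rw [hget a]; exact (hptr a ha).1
      refine ⟨_, ⟨a, ⟨⟨ha, by exact hm⟩, (want_slice_eq ptrs_curr plans a ha h0a hpos hm)⟩⟩,
              ⟨p, ⟨⟨hp, by exact hfin⟩, hlast⟩⟩⟩
    · rw [if_neg hm] at hA; exact absurd hA (by simp)
  · rintro ⟨x, ⟨a, ⟨⟨ha, hmov⟩, hxw⟩⟩, ⟨p, ⟨⟨hp, hfin⟩, hxf⟩⟩⟩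
    have hmov' : (PySem.List.pyGet? ptrs_curr (a : Int)).getD 0 < ((plans.getD a []).length : Int) - 1 := hmov
    have h0a : 0 ≤ (PySem.List.pyGet? ptrs_curr (a : Int)).getD 0 := by
      rw [hget a]; exact (hptr a ha).1
    refine ⟨a, ha, ?_⟩
    rw [if_pos hmov']
    simp only [List.any_eq_true, List.mem_range, Bool.and_eq_true, decide_eq_true_eq, beq_iff_eq]
    have hne : p ≠ a := by
      intro hpe; subst hpe; rw [hfin] at hmov'; omega
    have hw : (PySem.List.pyGet? (plans.getD p []) (-1)).getD [] =
        [(PySem.List.pyGet? ((PySem.List.pyGet? (plans.getD a []) ((PySem.List.pyGet? ptrs_curr (a : Int)).getD 0 + 1)).getD []) 0).getD 0,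
         (PySem.List.pyGet? ((PySem.List.pyGet? (plans.getD a []) ((PySem.List.pyGet? ptrs_curr (a : Int)).getD 0 + 1)).getD []) 1).getD 0] := by
      rw [hxf, ← hxw, want_slice_eq ptrs_curr plans a ha h0a hpos hmov']
    exact ⟨p, hp, ⟨hne, hw⟩, hfin⟩
  

-- ===== VERDICT (by name: the statement is the Claim_ definition above) =====
theorem stuck_spec : Claim_equal_stuck := by
  intro pc pp plans _hd hpre
  unfold Spec_stuck
  by_cases h : pc = pp
  · subst h
    obtain ⟨h1, h2, h3⟩ := hpre rfl
    exact stuck_main pc plans h1 h2 h3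
  · simp [stuck, stuck_alt, h]
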